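-- pv_equiv track=rewrite | github.com/Akaisorani/code_data_of_mvgpt | llm_train_code/fastchat/serve/gradio_web_server_multi.py | post_process_code
-- ===== SOURCE A (Python) =====
-- def post_process_code(code):
--     sep = "\n```"
--     if sep in code:
--         blocks = code.split(sep)
--         if len(blocks) % 2 == 1:
--             for i in range(1, len(blocks), 2):
--                 blocks[i] = blocks[i].replace("\\_", "_")
--         code = sep.join(blocks)
--     return code
-- ===== SOURCE B (Python) =====
-- def post_process_code(code):
--     sep = "\n```"
--     n = code.count(sep)
--     if n == 0 or n % 2 == 1:
--         return code
--     out = []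
--     inside = False
--     i = 0
--     while i < len(code):
--         if code.startswith(sep, i):
--             out.append(sep)
--             i += len(sep)
--             inside = not inside
--         elif inside and code.startswith("\\_", i):
--             out.append("_")
--             i += 2
--         else:
--             out.append(code[i])
--             i += 1
--     return "".join(out)
-- ===== Notes on version B (the rewrite author's own statement) =====
-- stated objective: alternative
-- what changed: Replaces split-into-blocks / rewrite-odd-blocks / rejoin with a guard on the fence count followed by a single left-to-right scan that toggles an inside-fence flag and unescapes underscores in place.
import Mathlib
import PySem

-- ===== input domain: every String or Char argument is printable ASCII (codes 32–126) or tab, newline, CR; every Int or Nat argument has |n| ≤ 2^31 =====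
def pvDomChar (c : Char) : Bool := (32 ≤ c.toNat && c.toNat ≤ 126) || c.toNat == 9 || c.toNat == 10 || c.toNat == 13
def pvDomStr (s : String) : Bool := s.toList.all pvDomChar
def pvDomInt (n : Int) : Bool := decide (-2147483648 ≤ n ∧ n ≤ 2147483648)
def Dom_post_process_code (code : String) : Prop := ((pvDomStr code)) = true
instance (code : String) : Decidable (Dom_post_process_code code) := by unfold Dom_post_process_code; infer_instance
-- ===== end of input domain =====

-- B replaces A's split / replace-odd-blocks / rejoin with a count guard plus one
-- left-to-right scan toggling an inside-fence flag (alternative decomposition, same cost).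

-- the two string literals both versions use
def ppcSep : List Char := ['\n', '`', '`', '`']
def ppcOld : List Char := ['\\', '_']

-- ===== PORT A =====
def post_process_code (code : String) : String :=
  if PySem.Chars.isIn ppcSep code.toList then
    let blocks := PySem.Chars.splitOn code.toList ppcSep
    let blocks :=
      if blocks.length % 2 == 1 then
        blocks.mapIdx (fun i b => if i % 2 == 1 then PySem.Chars.replace b ppcOld ['_'] else b)
      else blocks
    String.ofList (PySem.Chars.join ppcSep blocks)
  else code

-- ===== PORT B =====
-- the while-loop of Source B: walk the character list once, toggling `inside` at each fence
def ppcScan (inside : Bool) (l : List Char) : List Char :=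
  match l with
  | [] => []
  | c :: t =>
    if h : ppcSep.isPrefixOf (c :: t) then
      ppcSep ++ ppcScan (!inside) ((c :: t).drop 4)
    else if inside && ppcOld.isPrefixOf (c :: t) then
      '_' :: ppcScan inside (t.drop 1)
    else
      c :: ppcScan inside t
termination_by l.length
decreasing_by
  · have h4 : 4 ≤ (c :: t).length := by
      simpa [ppcSep] using (List.isPrefixOf_iff_prefix.mp h).length_le
    simp only [List.length_drop, List.length_cons] at h4 ⊢
    omega
  · simp only [List.length_drop, List.length_cons]
    omega
  · simp only [List.length_cons]
    omega

def post_process_code_alt (code : String) : String :=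
  let n := PySem.Chars.count code.toList ppcSep
  if n == 0 || n % 2 == 1 then code
  else String.ofList (ppcScan false code.toList)

-- ===== PRECONDITION & SPEC =====
def Spec_post_process_code (code : String) (out : String) : Prop := out = post_process_code_alt code
instance (code : String) (out : String) : Decidable (Spec_post_process_code code out) := by unfold Spec_post_process_code; infer_instance

-- ===== CLAIM (what is proved, stated in full; the proofs are below) =====
def Claim_equal_post_process_code : Prop := ∀ (code : String), Dom_post_process_code code → Spec_post_process_code code (post_process_code code)

-- ===== LEMMAS AND PROOFS =====

-- clean recursive models of the PySem fuel scans, used only in the proofs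
def myReplace (l : List Char) : List Char :=
  match l with
  | [] => []
  | c :: t =>
    if ppcOld.isPrefixOf (c :: t) then '_' :: myReplace (t.drop 1) else c :: myReplace t
termination_by l.length
decreasing_by
  · simp only [List.length_drop, List.length_cons]; omega
  · simp only [List.length_cons]; omega

def mySplit (l : List Char) : List (List Char) :=
  match l with
  | [] => [[]]
  | c :: t =>
    if h : ppcSep.isPrefixOf (c :: t) then
      [] :: mySplit ((c :: t).drop 4)
    else
      match mySplit t with
      | [] => [[c]]
      | b :: bs => (c :: b) :: bs
termination_by l.length
decreasing_by
  · have h4 : 4 ≤ (c :: t).length := by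
      simpa [ppcSep] using (List.isPrefixOf_iff_prefix.mp h).length_le
    simp only [List.length_drop, List.length_cons] at h4 ⊢
    omega
  · simp only [List.length_cons]
    omega

def mapAlt (inside : Bool) (bs : List (List Char)) : List (List Char) :=
  match bs with
  | [] => []
  | b :: r => (if inside then myReplace b else b) :: mapAlt (!inside) r

def consApp (pre : List Char) (bs : List (List Char)) : List (List Char) :=
  match bs with
  | [] => [pre]
  | b :: r => (pre ++ b) :: r

theorem mySplit_nil : mySplit [] = [[]] := by
  simp [mySplit.eq_def]

theorem mySplit_ne_nil (l : List Char) : mySplit l ≠ [] := by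
  cases l with
  | nil => rw [mySplit_nil]; simp
  | cons c t =>
    rw [mySplit]
    split
    · simp
    · split <;> simp

theorem isPrefixOf_old (c : Char) (x : List Char) :
    ppcOld.isPrefixOf (c :: x) = (c == '\\' && decide (x.head? = some '_')) := by
  cases x with
  | nil => simp [ppcOld, List.isPrefixOf]
  | cons a r =>
    rcases eq_or_ne c '\\' with rfl | hc
    · rcases eq_or_ne a '_' with rfl | ha
      · simp [ppcOld, List.isPrefixOf]
      · have h1 : ('_' == a) = false := by simp [Ne.symm ha]
        have h2 : (decide (a = '_')) = false := by simp [ha]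
        simp [ppcOld, List.isPrefixOf, h1, h2]
    · have h1 : ('\\' == c) = false := by simp [Ne.symm hc]
      have h2 : (c == '\\') = false := by simp [hc]
      simp [ppcOld, List.isPrefixOf, h1, h2]

theorem head_mySplit (l b : List Char) (bs : List (List Char))
    (h : mySplit l = b :: bs) : b = [] ∨ b.head? = l.head? := by
  cases l with
  | nil => rw [mySplit_nil] at h; cases h; left; rfl
  | cons c t =>
    rw [mySplit] at h
    split at h
    · cases h; left; rfl
    · split at h <;> (cases h; right; rfl)

theorem join_cons_head (c : Char) (x : List Char) (r : List (List Char)) :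
    PySem.Chars.join ppcSep ((c :: x) :: r) = c :: PySem.Chars.join ppcSep (x :: r) := by
  cases r with
  | nil => simp [PySem.Chars.join_singleton]
  | cons q rest => simp [PySem.Chars.join_cons_cons]

theorem join_nil_cons (b : List Char) (r : List (List Char)) :
    PySem.Chars.join ppcSep ([] :: b :: r) = ppcSep ++ PySem.Chars.join ppcSep (b :: r) := by
  simp [PySem.Chars.join_cons_cons]

-- the single scan computes exactly A's join-of-alternately-rewritten-blocks
theorem scan_eq (inside : Bool) (l : List Char) :
    ppcScan inside l = PySem.Chars.join ppcSep (mapAlt inside (mySplit l)) := by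
  induction inside, l using ppcScan.induct with
  | case1 inside =>
    rw [ppcScan, mySplit]
    simp [mapAlt, myReplace, PySem.Chars.join_singleton]
  | case2 inside c t h ih =>
    rw [ppcScan, dif_pos h, mySplit, dif_pos h]
    obtain ⟨b, bs, hbs⟩ : ∃ b bs, mySplit ((c :: t).drop 4) = b :: bs := by
      cases hm : mySplit ((c :: t).drop 4) with
      | nil => exact absurd hm (mySplit_ne_nil _)
      | cons b bs => exact ⟨b, bs, rfl⟩
    rw [ih, hbs]
    simp only [mapAlt, myReplace]
    rw [show (if inside = true then ([] : List Char) else []) = [] from by split <;> rfl,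
      join_nil_cons]
  | case3 inside c t h hcond ih =>
    rw [ppcScan, dif_neg h, if_pos hcond]
    have hin : inside = true := by
      cases inside <;> simp_all
    have hold : ppcOld.isPrefixOf (c :: t) = true := by
      cases hi : ppcOld.isPrefixOf (c :: t) <;> simp_all
    rw [isPrefixOf_old] at hold
    obtain ⟨hc, ht⟩ : c = '\\' ∧ t.head? = some '_' := by
      constructor
      · have := (Bool.and_eq_true _ _).mp hold |>.1; exact beq_iff_eq.mp this
      · have := (Bool.and_eq_true _ _).mp hold |>.2; exact of_decide_eq_true this
    obtain ⟨t', rfl⟩ : ∃ t', t = '_' :: t' := by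
      cases t with
      | nil => simp at ht
      | cons a r => simp at ht; exact ⟨r, by rw [ht]⟩
    simp only [List.drop_succ_cons, List.drop_zero] at ih ⊢
    obtain ⟨b, bs, hbs⟩ : ∃ b bs, mySplit t' = b :: bs := by
      cases hm : mySplit t' with
      | nil => exact absurd hm (mySplit_ne_nil _)
      | cons b bs => exact ⟨b, bs, rfl⟩
    have hs2 : mySplit ('_' :: t') = ('_' :: b) :: bs := by
      rw [mySplit, dif_neg (by simp [ppcSep] : ¬ (ppcSep.isPrefixOf ('_' :: t') = true)), hbs]
    have hsplit : mySplit (c :: '_' :: t') = (c :: '_' :: b) :: bs := by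
      rw [mySplit, dif_neg h, hs2]
    rw [hsplit, ih, hbs, hin]
    simp only [mapAlt, if_true]
    have hrep : myReplace (c :: '_' :: b) = '_' :: myReplace b := by
      rw [myReplace]
      simp [isPrefixOf_old, hc]
    rw [hrep, join_cons_head]
  | case4 inside c t h hcond ih =>
    rw [ppcScan, dif_neg h, if_neg hcond]
    obtain ⟨b, bs, hbs⟩ : ∃ b bs, mySplit t = b :: bs := by
      cases hm : mySplit t with
      | nil => exact absurd hm (mySplit_ne_nil _)
      | cons b bs => exact ⟨b, bs, rfl⟩
    have hsplit : mySplit (c :: t) = (c :: b) :: bs := by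
      rw [mySplit, dif_neg h, hbs]
    rw [hsplit, ih, hbs]
    cases hin : inside with
    | false =>
      simp only [mapAlt, Bool.false_eq_true, if_false, Bool.not_false]
      rw [join_cons_head]
    | true =>
      have hnold : ppcOld.isPrefixOf (c :: b) = false := by
        rcases head_mySplit t b bs hbs with hb | hb
        · subst hb; simp [isPrefixOf_old]
        · rw [isPrefixOf_old, hb]
          have : ppcOld.isPrefixOf (c :: t) = false := by
            cases hi : ppcOld.isPrefixOf (c :: t) <;> simp_all
          rw [isPrefixOf_old] at this
          exact this
      have hrep : myReplace (c :: b) = c :: myReplace b := by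
        rw [myReplace]; simp [hnold]
      simp only [mapAlt, if_true, Bool.not_true]
      rw [hrep, join_cons_head]

-- PySem's fuel-based splitter computes mySplit
theorem splitOn_go_eq (fuel : Nat) (l cur : List Char) (acc : List (List Char))
    (hf : l.length ≤ fuel) :
    PySem.Chars.splitOn.go ppcSep fuel l cur acc =
      acc.reverse ++ consApp cur.reverse (mySplit l) := by
  induction fuel generalizing l cur acc with
  | zero =>
    have : l = [] := by cases l <;> simp_all
    subst this
    simp [PySem.Chars.splitOn.go, mySplit_nil, consApp]
  | succ fuel ih =>
    cases l with
    | nil => simp [PySem.Chars.splitOn.go, mySplit_nil, consApp]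
    | cons c rest =>
      rw [PySem.Chars.splitOn.go]
      split
      · rename_i hpre
        rw [ih _ _ _ (by simp [ppcSep, ppcOld] at hf ⊢; omega)]
        rw [mySplit]
        simp only [hpre, dite_true]
        obtain ⟨b, bs, hbs⟩ : ∃ b bs, mySplit ((c :: rest).drop 4) = b :: bs := by
          cases hm : mySplit ((c :: rest).drop 4) with
          | nil => exact absurd hm (mySplit_ne_nil _)
          | cons b bs => exact ⟨b, bs, rfl⟩
        have hlen : ppcSep.length = 4 := by decide
        rw [hlen, hbs]
        simp [consApp]
      · rename_i hpre
        rw [ih _ _ _ (by simp [ppcSep, ppcOld] at hf ⊢; omega)]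
        rw [mySplit]
        simp only [hpre, Bool.false_eq_true, dite_false]
        cases hm : mySplit rest with
        | nil => exact absurd hm (mySplit_ne_nil _)
        | cons b bs => simp [consApp]
  
theorem splitOn_eq (l : List Char) : PySem.Chars.splitOn l ppcSep = mySplit l := by
  unfold PySem.Chars.splitOn
  rw [splitOn_go_eq _ _ _ _ (by omega)]
  cases hm : mySplit l with
  | nil => exact absurd hm (mySplit_ne_nil _)
  | cons b bs => simp [consApp]

-- PySem's fuel-based replace computes myReplace
theorem replace_go_eq (fuel : Nat) (l acc : List Char) (hf : l.length ≤ fuel) :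
    PySem.Chars.replace.go ppcOld ['_'] fuel l acc = acc.reverse ++ myReplace l := by
  induction fuel generalizing l acc with
  | zero =>
    have : l = [] := by cases l <;> simp_all
    subst this
    simp [PySem.Chars.replace.go, myReplace]
  | succ fuel ih =>
    cases l with
    | nil => simp [PySem.Chars.replace.go, myReplace]
    | cons c t =>
      rw [PySem.Chars.replace.go]
      split
      · rename_i hpre
        rw [ih _ _ (by simp [ppcSep, ppcOld] at hf ⊢; omega)]
        rw [myReplace]
        simp only [hpre, if_true]
        have hlen : ppcOld.length = 2 := by decide
        rw [hlen]
        simp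
      · rename_i hpre
        rw [ih _ _ (by simp [ppcSep, ppcOld] at hf ⊢; omega)]
        rw [myReplace]
        simp only [hpre, Bool.false_eq_true, if_false]
        simp

theorem replace_eq (l : List Char) : PySem.Chars.replace l ppcOld ['_'] = myReplace l := by
  unfold PySem.Chars.replace
  rw [if_neg (by decide)]
  exact replace_go_eq _ _ _ (le_refl _)

-- PySem's fuel-based count computes the number of separators = block count - 1
theorem count_go_eq (fuel : Nat) (l : List Char) (acc : Nat) (hf : l.length ≤ fuel) :
    PySem.Chars.count.go ppcSep fuel l acc = acc + ((mySplit l).length - 1) := by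
  induction fuel generalizing l acc with
  | zero =>
    have : l = [] := by cases l <;> simp_all
    subst this
    simp [PySem.Chars.count.go, mySplit_nil]
  | succ fuel ih =>
    cases l with
    | nil => simp [PySem.Chars.count.go, mySplit_nil]
    | cons c rest =>
      rw [PySem.Chars.count.go]
      split
      · rename_i hpre
        rw [ih _ _ (by simp [ppcSep, ppcOld] at hf ⊢; omega)]
        rw [mySplit]
        simp only [hpre, dite_true]
        have h1 : mySplit ((c :: rest).drop 4) ≠ [] := mySplit_ne_nil _
        have hlen : ppcSep.length = 4 := by decide
        rw [hlen]
        cases hm : mySplit ((c :: rest).drop 4) with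
        | nil => exact absurd hm h1
        | cons b bs => simp [hm]; omega
      · rename_i hpre
        rw [ih _ _ (by simp [ppcSep, ppcOld] at hf ⊢; omega)]
        rw [mySplit]
        simp only [hpre, Bool.false_eq_true, dite_false]
        cases hm : mySplit rest with
        | nil => exact absurd hm (mySplit_ne_nil _)
        | cons b bs => simp

theorem count_eq (l : List Char) :
    PySem.Chars.count l ppcSep = (mySplit l).length - 1 := by
  unfold PySem.Chars.count
  rw [if_neg (by decide)]
  simpa using count_go_eq l.length l 0 (le_refl _)

-- a single block iff the separator does not occur
theorem mySplit_len_one_iff (l : List Char) :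
    (mySplit l).length = 1 ↔ ¬ ppcSep <:+: l := by
  induction l using mySplit.induct with
  | case1 =>
    rw [mySplit_nil]
    simp [List.infix_nil, ppcSep]
  | case2 c t h ih =>
    rw [mySplit, dif_pos h]
    have h1 : mySplit ((c :: t).drop 4) ≠ [] := mySplit_ne_nil _
    have h2 : ppcSep <:+: (c :: t) := (List.isPrefixOf_iff_prefix.mp h).isInfix
    constructor
    · intro hlen
      exfalso
      cases hm : mySplit ((c :: t).drop 4) with
      | nil => exact h1 hm
      | cons b bs => rw [hm] at hlen; simp at hlen
    · intro hni; exact absurd h2 hni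
  | case3 c t h hnil ih =>
    exact absurd hnil (mySplit_ne_nil t)
  | case4 c t h b bs hbs ih =>
    rw [mySplit, dif_neg h, hbs]
    rw [hbs] at ih
    have hnp : ¬ ppcSep <+: (c :: t) := fun hp =>
      by rw [List.isPrefixOf_iff_prefix.mpr hp] at h; simp at h
    rw [List.infix_cons_iff]
    simp only [List.length_cons] at ih ⊢
    constructor
    · intro hlen
      rintro (hp | hi)
      · exact hnp hp
      · exact (ih.mp hlen) hi
    · intro hni
      exact ih.mpr fun hi => hni (Or.inr hi)

-- rejoining the split blocks gives back the string
theorem join_mySplit (l : List Char) :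
    PySem.Chars.join ppcSep (mySplit l) = l := by
  induction l using mySplit.induct with
  | case1 =>
    rw [mySplit_nil, PySem.Chars.join_singleton]
  | case2 c t h ih =>
    rw [mySplit, dif_pos h]
    obtain ⟨b, bs, hbs⟩ : ∃ b bs, mySplit ((c :: t).drop 4) = b :: bs := by
      cases hm : mySplit ((c :: t).drop 4) with
      | nil => exact absurd hm (mySplit_ne_nil _)
      | cons b bs => exact ⟨b, bs, rfl⟩
    rw [hbs, join_nil_cons, ← hbs, ih]
    obtain ⟨r, hr⟩ := List.isPrefixOf_iff_prefix.mp h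
    rw [← hr, show (4 : Nat) = ppcSep.length from rfl, List.drop_left]
  | case3 c t h hnil ih =>
    exact absurd hnil (mySplit_ne_nil t)
  | case4 c t h b bs hbs ih =>
    rw [mySplit, dif_neg h, hbs]
    rw [hbs] at ih
    rw [join_cons_head, ih]

-- A's odd-index mapIdx is the alternating map
theorem mapIdx_parity (bs : List (List Char)) (j : Nat) :
    bs.mapIdx (fun i b => if (i + j) % 2 == 1 then PySem.Chars.replace b ppcOld ['_'] else b) =
      mapAlt ((j % 2 == 1 : Bool)) bs := by
  induction bs generalizing j with
  | nil => simp [mapAlt]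
  | cons b r ih =>
    rw [List.mapIdx_cons]
    simp only [mapAlt]
    have hfun : (fun (i : Nat) (b : List Char) =>
        (fun (i : Nat) (b : List Char) =>
          if (i + j) % 2 == 1 then PySem.Chars.replace b ppcOld ['_'] else b) (i + 1) b) =
        (fun (i : Nat) (b : List Char) =>
          if (i + (j + 1)) % 2 == 1 then PySem.Chars.replace b ppcOld ['_'] else b) := by
      funext i b
      show (if ((i + 1 + j) % 2 == 1) = true then PySem.Chars.replace b ppcOld ['_'] else b) =
        (if ((i + (j + 1)) % 2 == 1) = true then PySem.Chars.replace b ppcOld ['_'] else b)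
      rw [show i + 1 + j = i + (j + 1) from by omega]
    rw [hfun, ih (j + 1)]
    have hpar : ((j + 1) % 2 == 1 : Bool) = !(j % 2 == 1 : Bool) := by
      rcases Nat.mod_two_eq_zero_or_one j with h | h <;> simp [Nat.add_mod, h]
    rw [hpar]
    congr 1
    rcases Nat.mod_two_eq_zero_or_one j with h | h <;>
      simp [h, replace_eq]

-- ===== VERDICT (by name: the statement is the Claim_ definition above) =====
theorem post_process_code_spec : Claim_equal_post_process_code := by
  intro code _
  unfold Spec_post_process_code post_process_code post_process_code_alt
  simp only [splitOn_eq, count_eq]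
  have hne : mySplit code.toList ≠ [] := mySplit_ne_nil _
  have hlen1 : 1 ≤ (mySplit code.toList).length := by
    cases hm : mySplit code.toList with
    | nil => exact absurd hm hne
    | cons b bs => simp
  by_cases h0 : ppcSep <:+: code.toList
  · have hin : PySem.Chars.isIn ppcSep code.toList = true :=
      (PySem.Chars.isIn_iff_infix _ _).mpr h0
    rw [hin]
    have hlen2 : 2 ≤ (mySplit code.toList).length := by
      rcases Nat.lt_or_ge (mySplit code.toList).length 2 with h | h
      · exfalso
        have : (mySplit code.toList).length = 1 := by omega
        exact (mySplit_len_one_iff _).mp this h0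
      · exact h
    simp only [if_true]
    by_cases hpar : (mySplit code.toList).length % 2 = 1
    · -- odd number of blocks: both rewrite
      have hA : ((mySplit code.toList).length % 2 == 1 : Bool) = true := by
        simp [hpar]
      have hB1 : (((mySplit code.toList).length - 1 == 0) : Bool) = false := by
        simp; omega
      have hB2 : ((((mySplit code.toList).length - 1) % 2 == 1) : Bool) = false := by
        simp; omega
      rw [hA, hB1, hB2]
      simp only [if_true, Bool.false_or, Bool.false_eq_true, if_false]
      have hmap := mapIdx_parity (mySplit code.toList) 0
      simp only [Nat.add_zero] at hmap
      rw [hmap]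
      have : ((0 % 2 == 1) : Bool) = false := by decide
      rw [this, ← scan_eq]
    · -- even number of blocks: both are the identity
      have hA : ((mySplit code.toList).length % 2 == 1 : Bool) = false := by
        simp [hpar]
      have hB2 : ((((mySplit code.toList).length - 1) % 2 == 1) : Bool) = true := by
        simp; omega
      rw [hA, hB2]
      simp only [Bool.false_eq_true, if_false, Bool.or_true, if_true]
      rw [join_mySplit, String.ofList_toList]
  · have hin : PySem.Chars.isIn ppcSep code.toList = false :=
      (PySem.Chars.isIn_eq_false_iff _ _).mpr h0
    rw [hin]
    have hlen : (mySplit code.toList).length = 1 := (mySplit_len_one_iff _).mpr h0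
    rw [hlen]
    simp
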